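-- pv_equiv track=rewrite | github.com/Happy-ryan/PS | 백준/Silver/1522. 문자열 교환/문자열 교환.py | solution
-- ===== SOURCE A (Python) =====
-- def solution(s):
--     n = len(s)
--     w = s.count('a') # window 안에 a만 존재 = a의 총 갯수 = window 크기
--     # 문자열 원형
--     s = s + s
--
--     # 1. 초기세팅
--     pb = s[0:0 + w].count('b')
--     cnt = int(1e18)
--
--     for i in range(n):
--         # 2. 조건 확인
--         cnt = min(cnt, pb)
--
--         # 3. 기존 칸 삭제
--         if s[i] == 'b':
--             pb -= 1
--         # 4. 다음 칸 준비
--         if s[i + w] == 'b':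
--             pb += 1
--
--     return cnt
-- ===== SOURCE B (Python) =====
-- def solution(s):
--     n = len(s)
--     w = s.count('a')
--     s2 = s + s
--     # prefix table: pref[k] = number of 'b' in s2[:k]
--     pref = [0]
--     for c in s2:
--         pref.append(pref[-1] + (c == 'b'))
--     cnt = int(1e18)
--     for i in range(n):
--         cnt = min(cnt, pref[i + w] - pref[i])
--     return cnt
-- ===== Notes on version B (the rewrite author's own statement) =====
-- stated objective: alternative
-- what changed: Replaces A's incrementally-adjusted rolling window counter with a precomputed prefix-count table of 'b' over the doubled string, each window count read off as pref[i+w]-pref[i].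
import Mathlib
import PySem

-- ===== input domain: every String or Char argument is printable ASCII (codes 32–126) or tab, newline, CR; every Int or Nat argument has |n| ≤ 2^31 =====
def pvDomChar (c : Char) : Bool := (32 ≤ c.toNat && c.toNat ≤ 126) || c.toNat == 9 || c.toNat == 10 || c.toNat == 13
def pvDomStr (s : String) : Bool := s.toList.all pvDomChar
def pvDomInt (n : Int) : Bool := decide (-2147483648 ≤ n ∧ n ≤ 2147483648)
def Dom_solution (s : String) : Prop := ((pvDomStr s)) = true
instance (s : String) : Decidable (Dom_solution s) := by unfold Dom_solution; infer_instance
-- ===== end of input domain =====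

-- B replaces A's incrementally-adjusted rolling 'b' counter with a prefix-count table over the
-- doubled string, reading each window count as a difference of two table entries (objective: alternative).

-- ===== PORT A =====
-- literal port of A; s.count('a') / .count('b') with a single-character needle is exactly List.count;
-- the two indexings s[i] and s[i+w] are always in range (i < n, w ≤ n, len(s+s) = 2n), so the
-- pyGetD default is never used.
def solution (s : String) : Int :=
  let l := s.toList
  let n := l.length
  let w := l.count 'a'
  let s2 := l ++ l
  let pb0 : Int := ((PySem.List.slice s2 (some 0) (some ((0 : Int) + (w : Int)))).count 'b' : Int)
  let r := (PySem.List.pyRange 0 (n : Int) 1).foldl (fun (st : Int × Int) i =>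
      let cnt := min st.1 st.2
      let pb := if PySem.List.pyGetD s2 i 'x' == 'b' then st.2 - 1 else st.2
      let pb := if PySem.List.pyGetD s2 (i + (w : Int)) 'x' == 'b' then pb + 1 else pb
      (cnt, pb)) (1000000000000000000, pb0)
  r.1

-- ===== PORT B =====
-- literal port of Source B (prefix-count table; pref[-1] is pyGetD at -1, pref is always non-empty)
def solution_alt (s : String) : Int :=
  let l := s.toList
  let n := l.length
  let w := l.count 'a'
  let s2 := l ++ l
  let pref : List Int :=
    s2.foldl (fun p c => p ++ [PySem.List.pyGetD p (-1) 0 + (if c == 'b' then 1 else 0)]) [0]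
  (PySem.List.pyRange 0 (n : Int) 1).foldl
    (fun cnt i => min cnt (PySem.List.pyGetD pref (i + (w : Int)) 0 - PySem.List.pyGetD pref i 0))
    1000000000000000000

-- ===== PRECONDITION & SPEC =====
def Spec_solution (s : String) (out : Int) : Prop := out = solution_alt s
instance (s : String) (out : Int) : Decidable (Spec_solution s out) := by unfold Spec_solution; infer_instance

-- ===== CLAIM (what is proved, stated in full; the proofs are below) =====
def Claim_equal_solution : Prop := ∀ (s : String), Dom_solution s → Spec_solution s (solution s)

-- ===== LEMMAS AND PROOFS =====

-- number of 'b' in the length-w window of s2 starting at j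
def pvWin (s2 : List Char) (w j : Nat) : Int := (((s2.drop j).take w).count 'b' : Int)

-- sliding the window one step right: drop the left cell, add the right cell
theorem pvWin_step (s2 : List Char) (w j : Nat) (hj : j + w < s2.length) :
    pvWin s2 w (j + 1) =
      pvWin s2 w j - (if s2[j]'(by omega) = 'b' then 1 else 0)
        + (if s2[j + w]'(by omega) = 'b' then 1 else 0) := by
  have hj' : j < s2.length := by omega
  rcases w with _ | v
  · simp [pvWin]
  · have hv : v < (s2.drop (j+1)).length := by simp; omega
    have h1 : (s2.drop (j+1)).take (v+1)
        = (s2.drop (j+1)).take v ++ [s2[j + (v+1)]'(by omega)] := by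
      rw [List.take_succ]
      simp [List.getElem?_drop, List.getElem?_eq_getElem (by omega : j + 1 + v < s2.length)]
      congr 1
      omega
    have h2 : s2.drop j = s2[j]'hj' :: s2.drop (j+1) := List.drop_eq_getElem_cons hj'
    unfold pvWin
    rw [h1, h2, List.take_succ_cons, List.count_append, List.count_cons]
    simp only [List.count_cons, List.count_nil, beq_iff_eq]
    split_ifs <;> push_cast <;> omega

-- B's table-building loop, characterised: it appends the running prefix counts
theorem pvPrefAux (t : List Char) : ∀ (p : List Int) (a : Int),
    t.foldl (fun p c => p ++ [PySem.List.pyGetD p (-1) 0 + (if c == 'b' then 1 else 0)]) (p ++ [a])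
      = (p ++ [a]) ++ (List.range t.length).map (fun k => a + ((t.take (k+1)).count 'b' : Int)) := by
  induction t with
  | nil => simp
  | cons c t' ih =>
    intro p a
    have hstep : (p ++ [a]) ++ [PySem.List.pyGetD (p ++ [a]) (-1) 0 + (if c == 'b' then 1 else 0)]
        = (p ++ [a]) ++ [(a + (if c == 'b' then 1 else 0))] := by
      rw [PySem.List.pyGetD_neg_one_append_singleton]
    simp only [List.foldl_cons]
    rw [hstep, ih (p ++ [a]) (a + (if c == 'b' then 1 else 0))]
    simp only [List.length_cons, List.range_succ_eq_map, List.map_cons, List.map_map]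
    simp [List.count_cons, List.take_succ_cons]
    intro k hk
    split_ifs <;> ring

-- reading the table: pref[k] is the number of 'b' in s2[:k]
theorem pvPref_get (s2 : List Char) (k : Nat) (hk : k ≤ s2.length) :
    PySem.List.pyGetD
      (s2.foldl (fun p c => p ++ [PySem.List.pyGetD p (-1) 0 + (if c == 'b' then 1 else 0)]) [0])
      (k : Int) 0 = ((s2.take k).count 'b' : Int) := by
  have h := pvPrefAux s2 [] 0
  simp only [List.nil_append] at h
  rw [h]
  cases k with
  | zero => simp [PySem.List.pyGetD_zero_cons]
  | succ j =>
    rw [PySem.List.pyGetD_natCast]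
    rw [List.singleton_append, List.getD_cons_succ]
    rw [PySem.List.getD_map_range _ _ _ _ (by omega : j < s2.length)]
    simp

-- a difference of two prefix counts is a window count
theorem pvWin_diff (s2 : List Char) (w k : Nat) :
    ((s2.take (k+w)).count 'b' : Int) - ((s2.take k).count 'b' : Int) = pvWin s2 w k := by
  rw [List.take_add, List.count_append, pvWin]
  push_cast
  ring

-- A's loop invariant: the pair is (running min of window counts, current window count)
theorem pvLoopA (s2 : List Char) (w : Nat) :
    ∀ (m : Nat), m + w ≤ s2.length → ∀ c0 : Int,
    (List.range m).foldl
      (fun (st : Int × Int) (k : Nat) =>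
        (min st.1 st.2,
          if PySem.List.pyGetD s2 ((k : Int) + (w : Int)) 'x' == 'b' then
            (if PySem.List.pyGetD s2 (k : Int) 'x' == 'b' then st.2 - 1 else st.2) + 1
          else if PySem.List.pyGetD s2 (k : Int) 'x' == 'b' then st.2 - 1 else st.2))
      (c0, pvWin s2 w 0)
    = ((List.range m).foldl (fun c k => min c (pvWin s2 w k)) c0, pvWin s2 w m) := by
  intro m
  induction m with
  | zero => intro _ c0; simp
  | succ m ih =>
    intro hm c0
    have hmw : m + w < s2.length := by omega
    have hm1 : m < s2.length := by omega
    rw [List.range_succ, List.foldl_append, List.foldl_append, ih (by omega) c0]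
    simp only [List.foldl_cons, List.foldl_nil]
    have g1 : PySem.List.pyGetD s2 (m : Int) 'x' = s2[m]'hm1 := by
      rw [PySem.List.pyGetD_natCast, List.getD_eq_getElem _ _ hm1]
    have g2 : PySem.List.pyGetD s2 ((m : Int) + (w : Int)) 'x' = s2[m + w]'hmw := by
      rw [show ((m : Int) + (w : Int)) = ((m + w : Nat) : Int) by push_cast; ring,
          PySem.List.pyGetD_natCast, List.getD_eq_getElem _ _ hmw]
    rw [g1, g2]
    have hstep := pvWin_step s2 w m hmw
    refine Prod.ext rfl ?_
    simp only [beq_iff_eq]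
    split_ifs at hstep ⊢ <;> omega

-- B's loop is the same running min of window counts
theorem pvLoopB (s2 : List Char) (w : Nat) :
    ∀ (m : Nat), m + w ≤ s2.length → ∀ c0 : Int,
    (List.range m).foldl
      (fun cnt (k : Nat) => min cnt
        (PySem.List.pyGetD
            (s2.foldl (fun p c => p ++ [PySem.List.pyGetD p (-1) 0 + (if c == 'b' then 1 else 0)]) [0])
            ((k : Int) + (w : Int)) 0
         - PySem.List.pyGetD
            (s2.foldl (fun p c => p ++ [PySem.List.pyGetD p (-1) 0 + (if c == 'b' then 1 else 0)]) [0])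
            (k : Int) 0)) c0
    = (List.range m).foldl (fun c k => min c (pvWin s2 w k)) c0 := by
  intro m
  induction m with
  | zero => intro _ c0; simp
  | succ m ih =>
    intro hm c0
    rw [List.range_succ, List.foldl_append, List.foldl_append, ih (by omega) c0]
    simp only [List.foldl_cons, List.foldl_nil]
    rw [show ((m : Int) + (w : Int)) = ((m + w : Nat) : Int) by push_cast; ring]
    rw [pvPref_get s2 (m + w) (by omega), pvPref_get s2 m (by omega), pvWin_diff]

theorem pvMain (s : String) : solution s = solution_alt s := by
  unfold solution solution_alt
  dsimp only
  set l := s.toList with hl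
  have hw : l.count 'a' ≤ l.length := List.count_le_length
  have hlen : (l ++ l).length = l.length + l.length := List.length_append
  have hn : l.length + l.count 'a' ≤ (l ++ l).length := by omega
  rw [PySem.List.pyRange_one]
  simp only [zero_add, sub_zero, Int.toNat_natCast]
  rw [List.foldl_map, List.foldl_map]
  have hpb0 : ((PySem.List.slice (l ++ l) (some 0) (some ((l.count 'a' : Nat) : Int))).count 'b' : Int)
      = pvWin (l ++ l) (l.count 'a') 0 := by
    rw [PySem.List.slice_zero_start, PySem.List.slice_to_natCast, pvWin, List.drop_zero]
  rw [hpb0, pvLoopA (l ++ l) (l.count 'a') l.length hn 1000000000000000000,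
      pvLoopB (l ++ l) (l.count 'a') l.length hn 1000000000000000000]

-- ===== VERDICT (by name: the statement is the Claim_ definition above) =====
theorem solution_spec : Claim_equal_solution := by
  intro s _
  show solution s = solution_alt s
  exact pvMain s
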